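-- pv_equiv track=rewrite | github.com/apatel3112/Lazor-Project | save_file.py | new_lazor_path
-- ===== SOURCE A (Python) =====
-- def new_lazor_path(Lazor_Path):
--     '''
--     Thsi function breaks the solved lazor_path into a list of lists which has
--     elements that differ by onnly one in either the x or y direction
--
--     Inputs:
--         lazor_path: solved lazor path from solver function. Length equal to
--         number of lazors
--     Oututs:
--         New_lazor_Path: lazor path used in load image
--     '''
--     # define new lazor path vairable
--     New_Lazor_Path = []
--     # loop through each lazor of origiinal lazor path list
--     for lazor in (Lazor_Path):
--         # initialize repeates_points vairable with the first index position
--         repeated_points = [0]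
--         # loop throguh each element of the lazor list
--         for i in range(1, len(lazor)):
--             # if a lazor positon changes by more than one from its previous point
--             # then that index position is added to repeated points
--             if abs((lazor[i][0]-lazor[i-1][0])) > 1 or abs((lazor[i][1]-lazor[i-1][1])) > 1:
--                 repeated_points.append(i)
--         # end repeated_points with the final index position of teh lazor
--         repeated_points.append(len(lazor))
--
--         # break each lazor down into lists between each repeated_postioin index
--         # and add each list to new lazor path variable
--
--         for i in range(1, len(repeated_points)):
--             new_lazor = lazor[repeated_points[i-1]:repeated_points[i]]
--             New_Lazor_Path.append(new_lazor)
--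
--
--     #return new lazor path variable
--
--     return New_Lazor_Path
-- ===== SOURCE B (Python) =====
-- def new_lazor_path(Lazor_Path):
--     out = []
--     for lazor in Lazor_Path:
--         if not lazor:
--             out.append([])
--             continue
--         cur = [lazor[0]]
--         for prev, pt in zip(lazor, lazor[1:]):
--             if abs(pt[0] - prev[0]) > 1 or abs(pt[1] - prev[1]) > 1:
--                 out.append(cur)
--                 cur = [pt]
--             else:
--                 cur.append(pt)
--         out.append(cur)
--     return out
-- ===== Notes on version B (the rewrite author's own statement) =====
-- stated objective: simpler
-- what changed: Replaces A's two-phase per-lazor scheme (collect a list of break indices, then slice the lazor between consecutive indices) with a single streaming pass that grows the current segment and flushes it at each break.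
import Mathlib
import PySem

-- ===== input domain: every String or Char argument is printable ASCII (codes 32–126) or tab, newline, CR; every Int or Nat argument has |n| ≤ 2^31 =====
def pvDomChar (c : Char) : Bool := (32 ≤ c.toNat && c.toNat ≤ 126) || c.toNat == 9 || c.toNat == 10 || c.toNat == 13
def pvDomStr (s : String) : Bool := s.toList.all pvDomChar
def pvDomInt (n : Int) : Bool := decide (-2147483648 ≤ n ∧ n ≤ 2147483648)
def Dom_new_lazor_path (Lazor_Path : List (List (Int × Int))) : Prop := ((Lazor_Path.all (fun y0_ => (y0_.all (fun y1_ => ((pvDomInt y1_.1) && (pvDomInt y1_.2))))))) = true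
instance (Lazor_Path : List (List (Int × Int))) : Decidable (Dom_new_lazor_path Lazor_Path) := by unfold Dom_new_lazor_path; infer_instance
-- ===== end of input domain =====

-- B replaces A's two-phase per-lazor scheme (collect a list of break indices, then slice the
-- lazor between consecutive indices) with a single streaming pass that flushes the current
-- segment at each break (objective: simpler).

-- ===== PORT A =====
-- A's break test 'abs(lazor[i][0]-lazor[i-1][0]) > 1 or abs(lazor[i][1]-lazor[i-1][1]) > 1'
-- (indices always in range: i runs over range(1, len(lazor)))
def pvBrkAtA (lazor : List (Int × Int)) (i : Int) : Bool :=
  decide (1 < ((PySem.List.pyGetD lazor i ((0:Int),(0:Int))).1 - (PySem.List.pyGetD lazor (i-1) ((0:Int),(0:Int))).1).natAbs)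
  || decide (1 < ((PySem.List.pyGetD lazor i ((0:Int),(0:Int))).2 - (PySem.List.pyGetD lazor (i-1) ((0:Int),(0:Int))).2).natAbs)

-- the body of A's outer 'for lazor in Lazor_Path' loop
def pvStepA (New_Lazor_Path : List (List (Int × Int))) (lazor : List (Int × Int)) : List (List (Int × Int)) :=
  let repeated_points :=
    ((PySem.List.pyRange 1 (PySem.List.len lazor) 1).foldl
      (fun rp i => if pvBrkAtA lazor i then rp ++ [i] else rp) [0])
    ++ [PySem.List.len lazor]
  (PySem.List.pyRange 1 (PySem.List.len repeated_points) 1).foldl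
    (fun acc i => acc ++ [PySem.List.slice lazor (some (PySem.List.pyGetD repeated_points (i-1) 0)) (some (PySem.List.pyGetD repeated_points i 0))])
    New_Lazor_Path

def new_lazor_path (Lazor_Path : List (List (Int × Int))) : List (List (Int × Int)) :=
  Lazor_Path.foldl pvStepA []

-- ===== PORT B =====
-- B's break test 'abs(pt[0]-prev[0]) > 1 or abs(pt[1]-prev[1]) > 1'
def pvBrk (p q : Int × Int) : Bool :=
  decide (1 < (q.1 - p.1).natAbs) || decide (1 < (q.2 - p.2).natAbs)

-- the body of B's outer 'for lazor in Lazor_Path' loop; the fold over 'zip(lazor, lazor[1:])'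
-- carries the pair (out, cur)
def pvStepB (out : List (List (Int × Int))) (lazor : List (Int × Int)) : List (List (Int × Int)) :=
  match lazor with
  | [] => out ++ [[]]
  | p :: rest =>
    let s := (lazor.zip rest).foldl
      (fun (s : List (List (Int × Int)) × List (Int × Int)) pq =>
        if pvBrk pq.1 pq.2 then (s.1 ++ [s.2], [pq.2]) else (s.1, s.2 ++ [pq.2]))
      (out, [p])
    s.1 ++ [s.2]

def new_lazor_path_alt (Lazor_Path : List (List (Int × Int))) : List (List (Int × Int)) :=
  Lazor_Path.foldl pvStepB []

-- ===== PRECONDITION & SPEC =====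
def Spec_new_lazor_path (Lazor_Path : List (List (Int × Int))) (out : List (List (Int × Int))) : Prop := out = new_lazor_path_alt Lazor_Path
instance (Lazor_Path : List (List (Int × Int))) (out : List (List (Int × Int))) : Decidable (Spec_new_lazor_path Lazor_Path out) := by unfold Spec_new_lazor_path; infer_instance

-- ===== CLAIM (what is proved, stated in full; the proofs are below) =====
def Claim_equal_new_lazor_path : Prop := ∀ (Lazor_Path : List (List (Int × Int))), Dom_new_lazor_path Lazor_Path → Spec_new_lazor_path Lazor_Path (new_lazor_path Lazor_Path)

-- ===== LEMMAS AND PROOFS =====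

-- reference segmentation: the segments of prev::rest when the current open segment is cur
-- (whose last point is prev)
def segsFrom (cur : List (Int × Int)) (prev : Int × Int) : List (Int × Int) → List (List (Int × Int))
  | [] => [cur]
  | q :: rest => if pvBrk prev q then cur :: segsFrom [q] q rest else segsFrom (cur ++ [q]) q rest

-- absolute break positions (as Nats) of prev::rest when prev sits at index k of the full list
def brkN (prev : Int × Int) : List (Int × Int) → Nat → List Nat
  | [], _ => []
  | q :: rest, k => (if pvBrk prev q then [k+1] else []) ++ brkN q rest (k+1)

-- slices of l between consecutive cut points
def pairsSl (l : List (Int × Int)) : List Nat → List (List (Int × Int))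
  | a :: b :: t => (l.drop a).take (b - a) :: pairsSl l (b :: t)
  | _ => []

theorem length_pairsSl (l : List (Int × Int)) (cs : List Nat) :
    (pairsSl l cs).length = cs.length - 1 := by
  induction cs with
  | nil => simp [pairsSl]
  | cons a t ih =>
    cases t with
    | nil => simp [pairsSl]
    | cons b t => simp [pairsSl] at ih ⊢; omega

theorem getElem?_pairsSl (l : List (Int × Int)) (cs : List Nat) (j : Nat)
    (h : j + 1 < cs.length) :
    (pairsSl l cs)[j]? = some ((l.drop (cs.getD j 0)).take (cs.getD (j+1) 0 - cs.getD j 0)) := by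
  induction cs generalizing j with
  | nil => simp at h
  | cons a t ih =>
    cases t with
    | nil => simp at h
    | cons b t =>
      cases j with
      | zero => simp [pairsSl]
      | succ j =>
        simp only [pairsSl, List.getElem?_cons_succ]
        rw [ih j (by simp at h ⊢; omega)]
        simp [List.getD]

-- A's second loop, as a map over the pyRange, computes the consecutive-cut slices
theorem map_pyRange_slices (l : List (Int × Int)) (cs : List Nat) :
    (PySem.List.pyRange 1 (PySem.List.len (cs.map (fun k => (Nat.cast k : Int)))) 1).map
      (fun i => PySem.List.slice l (some (PySem.List.pyGetD (cs.map (fun k => (Nat.cast k : Int))) (i-1) 0))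
                                   (some (PySem.List.pyGetD (cs.map (fun k => (Nat.cast k : Int))) i 0)))
    = pairsSl l cs := by
  apply List.ext_getElem?
  intro j
  rw [List.getElem?_map, PySem.List.getElem?_pyRange_one, PySem.List.len_eq, List.length_map]
  by_cases h : j + 1 < cs.length
  · rw [getElem?_pairsSl l cs j h, if_pos (by omega)]
    simp only [Option.map_some]
    have h1 : (1 : Int) + (j : Int) - 1 = ((j : Nat) : Int) := by omega
    have h2 : (1 : Int) + (j : Int) = (((j+1) : Nat) : Int) := by omega
    rw [h1, h2, PySem.List.pyGetD_natCast, PySem.List.pyGetD_natCast]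
    have g : ∀ m : Nat, (cs.map (fun k => (Nat.cast k : Int))).getD m 0 = ((cs.getD m 0 : Nat) : Int) := by
      intro m
      rw [List.getD_eq_getElem?_getD, List.getElem?_map, List.getD_eq_getElem?_getD]
      cases cs[m]? <;> simp
    rw [g j, g (j+1), PySem.List.slice_natCast]
  · rw [if_neg (by omega), List.getElem?_eq_none (by rw [length_pairsSl]; omega)]
    simp

-- A's first loop: the filtered pyRange is exactly brkN
theorem filter_pyRange_brkN (l : List (Int × Int)) :
    ∀ (rest : List (Int × Int)) (prev : Int × Int) (k : Nat),
      l[k]? = some prev → l.drop (k+1) = rest →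
      (PySem.List.pyRange ((k : Int) + 1) ((l.length : Int)) 1).filter (fun i => pvBrkAtA l i)
        = (brkN prev rest k).map (fun m => (Nat.cast m : Int)) := by
  intro rest
  induction rest with
  | nil =>
    intro prev k hk hd
    have hlen : l.length ≤ k + 1 := by
      have := congrArg List.length hd; simp at this; omega
    rw [PySem.List.pyRange_one_eq_nil (by omega)]
    simp [brkN]
  | cons q rest ih =>
    intro prev k hk hd
    have hq : l[k+1]? = some q := by
      have : (l.drop (k+1))[0]? = l[k+1]? := by rw [List.getElem?_drop]
      rw [hd] at this; simpa using this.symm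
    have hklt : k + 1 < l.length := List.getElem?_eq_some_iff.mp hq |>.1
    have hd2 : l.drop (k+2) = rest := by
      have : l.drop (k+2) = (l.drop (k+1)).drop 1 := by rw [List.drop_drop]
      rw [this, hd]; simp
    rw [PySem.List.pyRange_one_cons (by omega)]
    rw [List.filter_cons]
    have hbrk : pvBrkAtA l ((k : Int) + 1) = pvBrk prev q := by
      have e1 : ((k : Int) + 1) = ((k + 1 : Nat) : Int) := by omega
      have e2 : ((k : Int) + 1 - 1) = ((k : Nat) : Int) := by omega
      unfold pvBrkAtA pvBrk
      rw [e2]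
      rw [e1, PySem.List.pyGetD_natCast, PySem.List.pyGetD_natCast,
        List.getD_eq_getElem?_getD, List.getD_eq_getElem?_getD, hq, hk]
      rfl
    have tail : ((k : Int) + 1 + 1) = (((k+1) : Nat) : Int) + 1 := by omega
    rw [hbrk, tail, ih q (k+1) hq hd2,
      show brkN prev (q::rest) k = (if pvBrk prev q then [k+1] else []) ++ brkN q rest (k+1) from rfl]
    by_cases hb : pvBrk prev q = true
    · simp [hb]
    · simp [hb]

-- cutting l at 0 :: brkN ++ [length] yields the streaming segmentation
theorem pairsSl_brkN (l : List (Int × Int)) :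
    ∀ (rest : List (Int × Int)) (prev : Int × Int) (c k : Nat),
      c ≤ k → l.drop k = prev :: rest →
      pairsSl l (c :: brkN prev rest k ++ [l.length])
        = segsFrom ((l.drop c).take (k + 1 - c)) prev rest := by
  intro rest
  induction rest with
  | nil =>
    intro prev c k hck hd
    have hlen : l.length = k + 1 := by
      have h1 := congrArg List.length hd
      simp at h1
      omega
    rw [hlen]
    simp [brkN, pairsSl, segsFrom]
  | cons q rest ih =>
    intro prev c k hck hd
    have hd1 : l.drop (k+1) = q :: rest := by
      have : l.drop (k+1) = (l.drop k).drop 1 := by rw [List.drop_drop]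
      rw [this, hd]; simp
    have hq : l[k+1]? = some q := by
      have : (l.drop (k+1))[0]? = l[k+1]? := by rw [List.getElem?_drop]
      rw [hd1] at this; simpa using this.symm
    rw [show brkN prev (q::rest) k = (if pvBrk prev q then [k+1] else []) ++ brkN q rest (k+1) from rfl]
    rw [show segsFrom ((l.drop c).take (k + 1 - c)) prev (q::rest)
        = if pvBrk prev q then (l.drop c).take (k + 1 - c) :: segsFrom [q] q rest
          else segsFrom ((l.drop c).take (k + 1 - c) ++ [q]) q rest from rfl]
    by_cases hb : pvBrk prev q = true
    · simp only [hb, if_true]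
      rw [show (c :: ([k+1] ++ brkN q rest (k+1)) ++ [l.length])
          = c :: (k+1) :: (brkN q rest (k+1) ++ [l.length]) from by simp]
      rw [show pairsSl l (c :: (k+1) :: (brkN q rest (k+1) ++ [l.length]))
          = (l.drop c).take ((k+1) - c) :: pairsSl l ((k+1) :: (brkN q rest (k+1) ++ [l.length])) from rfl]
      rw [show ((k+1) :: (brkN q rest (k+1) ++ [l.length])) = ((k+1) :: brkN q rest (k+1) ++ [l.length]) from by simp]
      rw [ih q (k+1) (k+1) (le_refl _) hd1]
      rw [show k + 1 + 1 - (k+1) = 1 from by omega, hd1]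
      simp
    · simp only [hb, Bool.false_eq_true, if_false]
      rw [show (c :: ([] ++ brkN q rest (k+1)) ++ [l.length]) = (c :: brkN q rest (k+1) ++ [l.length]) from by simp]
      rw [ih q c (k+1) (by omega) hd1]
      congr 1
      rw [show k + 1 + 1 - c = (k + 1 - c) + 1 from by omega]
      rw [List.take_add_one]
      congr 1
      rw [List.getElem?_drop]
      rw [show c + (k + 1 - c) = k + 1 from by omega, hq]
      rfl

-- B's inner fold flushes exactly the streaming segmentation
theorem stepB_eq' (out : List (List (Int × Int))) (cur : List (Int × Int)) (prev : Int × Int)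
    (rest : List (Int × Int)) :
    (let s := ((prev :: rest).zip rest).foldl
      (fun (s : List (List (Int × Int)) × List (Int × Int)) pq =>
        if pvBrk pq.1 pq.2 then (s.1 ++ [s.2], [pq.2]) else (s.1, s.2 ++ [pq.2]))
      (out, cur)
     s.1 ++ [s.2]) = out ++ segsFrom cur prev rest := by
  induction rest generalizing prev out cur with
  | nil => simp [segsFrom]
  | cons q rest ih =>
    rw [show ((prev :: q :: rest).zip (q :: rest)) = (prev, q) :: ((q :: rest).zip rest) from rfl]
    simp only [List.foldl_cons]
    by_cases hb : pvBrk prev q = true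
    · simp only [hb, if_true]
      rw [ih (out ++ [cur]) [q] q]
      simp [segsFrom, hb]
    · simp only [hb, Bool.false_eq_true, if_false]
      rw [ih out (cur ++ [q]) q]
      simp [segsFrom, hb]

theorem stepA_eq_stepB (acc : List (List (Int × Int))) (lazor : List (Int × Int)) :
    pvStepA acc lazor = pvStepB acc lazor := by
  cases lazor with
  | nil =>
    show pvStepA acc [] = acc ++ [[]]
    unfold pvStepA
    norm_num [PySem.List.len_eq, PySem.List.pyRange_one_eq_nil]
    rw [show PySem.List.pyRange 1 2 1 = [1] from by decide]
    simp [PySem.List.slice]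
  | cons p rest =>
    have hB : pvStepB acc (p :: rest) = acc ++ segsFrom [p] p rest := stepB_eq' acc [p] p rest
    rw [hB]
    unfold pvStepA
    simp only [PySem.List.foldl_append_if, List.map_id', PySem.List.foldl_append_singleton_eq_map]
    have hf : (PySem.List.pyRange 1 ((p :: rest).length : Int) 1).filter (fun i => pvBrkAtA (p :: rest) i)
        = (brkN p rest 0).map (fun m => (Nat.cast m : Int)) := by
      have h := filter_pyRange_brkN (p :: rest) rest p 0 (by simp) (by simp)
      norm_num at h
      exact h
    rw [PySem.List.len_eq, hf]
    have hcs : ([(0 : Int)] ++ (brkN p rest 0).map (fun m => (Nat.cast m : Int))) ++ [((p :: rest).length : Int)]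
        = ((0 :: brkN p rest 0 ++ [(p :: rest).length]).map (fun k => (Nat.cast k : Int))) := by
      simp
    rw [hcs, map_pyRange_slices (p :: rest) (0 :: brkN p rest 0 ++ [(p :: rest).length])]
    rw [pairsSl_brkN (p :: rest) rest p 0 0 (le_refl 0) (by simp)]
    simp

-- ===== VERDICT (by name: the statement is the Claim_ definition above) =====
theorem new_lazor_path_spec : Claim_equal_new_lazor_path := by
  intro L _
  show new_lazor_path L = new_lazor_path_alt L
  unfold new_lazor_path new_lazor_path_alt
  rw [funext (fun a => funext (fun l => stepA_eq_stepB a l))]
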